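-- pv_equiv track=rewrite | github.com/mohamedlarbisentissi/fluid-simulation | custom_pre_compiler.py | inlineDerivatives
-- ===== SOURCE A (Python) =====
-- def inlineSingleDerivative(field, deriv, boundaryFlags):
--     if deriv == '0':
--         if boundaryFlags[0]:
--             return f'({field}[index_xp] - {field}[index]) / dx'
--         elif boundaryFlags[1]:
--             return f'({field}[index] - {field}[index_xm]) / dx'
--         else:
--             return f'({field}[index_xp] - {field}[index_xm]) / (2 * dx)'
--     elif deriv == '1':
--         if boundaryFlags[2]:
--             return f'({field}[index_yp] - {field}[index]) / dx'
--         elif boundaryFlags[3]: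
--             return f'({field}[index] - {field}[index_ym]) / dx'
--         else:
--             return f'({field}[index_yp] - {field}[index_ym]) / (2 * dx)'
--     elif deriv == '2':
--         if boundaryFlags[4]:
--             return f'({field}[index_zp] - {field}[index]) / dx'
--         elif boundaryFlags[5]:
--             return f'({field}[index] - {field}[index_zm]) / dx'
--         else:
--             return f'({field}[index_zp] - {field}[index_zm]) / (2 * dx)'
--     elif deriv == '3':
--         if boundaryFlags[0]:
--             return f'({field}[index_xpp] - 2 * {field}[index_xp] + {field}[index]) / (dx * dx)'
--         elif boundaryFlags[1]:
--             return f'({field}[index] - 2 * {field}[index_xm] + {field}[index_xmm]) / (dx * dx)'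
--         else:
--             return f'({field}[index_xp] - 2 * {field}[index] + {field}[index_xm]) / (dx * dx)'
--     elif deriv == '4':
--         if boundaryFlags[2]:
--             return f'({field}[index_ypp] - 2 * {field}[index_yp] + {field}[index]) / (dx * dx)'
--         elif boundaryFlags[3]:
--             return f'({field}[index] - 2 * {field}[index_ym] + {field}[index_ymm]) / (dx * dx)'
--         else:
--             return f'({field}[index_yp] - 2 * {field}[index] + {field}[index_ym]) / (dx * dx)'
--     elif deriv == '5':
--         if boundaryFlags[4]:
--             return f'({field}[index_zpp] - 2 * {field}[index_zp] + {field}[index]) / (dx * dx)'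
--         elif boundaryFlags[5]:
--             return f'({field}[index] - 2 * {field}[index_zm] + {field}[index_zmm]) / (dx * dx)'
--         else:
--             return f'({field}[index_zp] - 2 * {field}[index] + {field}[index_zm]) / (dx * dx)'
--
-- def inlineDerivatives(kernel, boundaryFlags):
--     newKernel = ''
--     lines = kernel.split('\n')
--     for line in lines:
--         if 'INLINE_DERIV' in line:
--             lineBefore = line.split('INLINE_DERIV')[0]
--             lineAfter = line.split('INLINE_DERIV')[1].split(')')[1]
--             funcArgs = line.split('INLINE_DERIV')[1]
--             funcArgs = funcArgs.split('(')[1].split(')')[0].split(',')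
--             field = funcArgs[0].strip()
--             deriv = funcArgs[1].strip()
--             newKernel += lineBefore + inlineSingleDerivative(field, deriv, boundaryFlags) + lineAfter + '\n'
--         else:
--             newKernel += line + '\n'
--     return newKernel
-- ===== SOURCE B (Python) =====
-- def _stencilTable(boundaryFlags):
--     # Compile the boundary flags once into 6 piece-lists; field.join(pieces) renders
--     # the stencil for derivative code d (0-2 first, 3-5 second derivatives).
--     flag = lambda i: boundaryFlags[i] if i < len(boundaryFlags) else False
--     table = []
--     for axis in range(3):
--         s = 'xyz'[axis]
--         if flag(2 * axis):
--             table.append(['(', f'[index_{s}p] - ', '[index]) / dx'])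
--         elif flag(2 * axis + 1):
--             table.append(['(', '[index] - ', f'[index_{s}m]) / dx'])
--         else:
--             table.append(['(', f'[index_{s}p] - ', f'[index_{s}m]) / (2 * dx)'])
--     for axis in range(3):
--         s = 'xyz'[axis]
--         if flag(2 * axis):
--             table.append(['(', f'[index_{s}pp] - 2 * ', f'[index_{s}p] + ', '[index]) / (dx * dx)'])
--         elif flag(2 * axis + 1):
--             table.append(['(', '[index] - 2 * ', f'[index_{s}m] + ', f'[index_{s}mm]) / (dx * dx)'])
--         else:
--             table.append(['(', f'[index_{s}p] - 2 * ', '[index] + ', f'[index_{s}m]) / (dx * dx)'])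
--     return table
--
-- def _substLine(line, table):
--     if 'INLINE_DERIV' not in line:
--         return line
--     before = line.split('INLINE_DERIV')[0]
--     rest = line.split('INLINE_DERIV')[1]
--     after = rest.split(')')[1]
--     args = rest.split('(')[1].split(')')[0].split(',')
--     field = args[0].strip()
--     return before + field.join(table[int(args[1].strip())]) + after
--
-- def inlineDerivatives(kernel, boundaryFlags):
--     table = _stencilTable(boundaryFlags)
--     return '\n'.join(_substLine(line, table) for line in kernel.split('\n')) + '\n'
-- ===== Notes on version B (the rewrite author's own statement) =====
-- stated objective: simpler
-- what changed: B is a two-stage pipeline: it first compiles the boundary flags once into a 6-entry table of stencil piece-lists (one per derivative code), then a pure substitution pass renders each macro as field.join(table[int(deriv)]) and joins the processed lines with '\n'; A instead re-runs an 18-branch flag/deriv cascade of f-string literals inside the line loop and accumulates with string +=.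
import Mathlib
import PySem

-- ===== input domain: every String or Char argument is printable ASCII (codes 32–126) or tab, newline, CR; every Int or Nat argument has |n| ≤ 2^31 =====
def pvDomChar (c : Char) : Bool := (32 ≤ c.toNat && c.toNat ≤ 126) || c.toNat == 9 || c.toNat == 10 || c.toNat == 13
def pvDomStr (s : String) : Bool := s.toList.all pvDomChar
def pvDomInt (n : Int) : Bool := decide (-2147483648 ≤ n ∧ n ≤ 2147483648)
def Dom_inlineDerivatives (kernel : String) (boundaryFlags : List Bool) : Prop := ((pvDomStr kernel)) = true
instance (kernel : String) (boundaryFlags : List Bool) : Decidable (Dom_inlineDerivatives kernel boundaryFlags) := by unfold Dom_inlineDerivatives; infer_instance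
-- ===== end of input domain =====

-- B is a two-stage pipeline: it first compiles the boundary flags ONCE into a 6-entry table of
-- stencil piece-lists (one per derivative code), then makes a pure substitution pass over the
-- lines rendering field.join(pieces); A re-runs an 18-branch flag cascade inside the line loop.
-- Objective: simpler. Equivalence is about the return value on inputs where A raises no exception.

-- s.split(sep) for the non-empty literal separators used here (never the default)
def pvSplit (s sep : String) : List String := (PySem.Str.split? s sep).getD [s]

-- ===== PORT A =====
def pvSingleA (field deriv : String) (flags : List Bool) : Option String :=
  if deriv = "0" then
    match PySem.List.pyGet? flags 0 with
    | none => none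
    | some b =>
      if b then some ("(" ++ field ++ "[index_xp] - " ++ field ++ "[index]) / dx")
      else match PySem.List.pyGet? flags 1 with
        | none => none
        | some b2 =>
          if b2 then some ("(" ++ field ++ "[index] - " ++ field ++ "[index_xm]) / dx")
          else some ("(" ++ field ++ "[index_xp] - " ++ field ++ "[index_xm]) / (2 * dx)")
  else if deriv = "1" then
    match PySem.List.pyGet? flags 2 with
    | none => none
    | some b =>
      if b then some ("(" ++ field ++ "[index_yp] - " ++ field ++ "[index]) / dx")
      else match PySem.List.pyGet? flags 3 with
        | none => none
        | some b2 =>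
          if b2 then some ("(" ++ field ++ "[index] - " ++ field ++ "[index_ym]) / dx")
          else some ("(" ++ field ++ "[index_yp] - " ++ field ++ "[index_ym]) / (2 * dx)")
  else if deriv = "2" then
    match PySem.List.pyGet? flags 4 with
    | none => none
    | some b =>
      if b then some ("(" ++ field ++ "[index_zp] - " ++ field ++ "[index]) / dx")
      else match PySem.List.pyGet? flags 5 with
        | none => none
        | some b2 =>
          if b2 then some ("(" ++ field ++ "[index] - " ++ field ++ "[index_zm]) / dx")
          else some ("(" ++ field ++ "[index_zp] - " ++ field ++ "[index_zm]) / (2 * dx)")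
  else if deriv = "3" then
    match PySem.List.pyGet? flags 0 with
    | none => none
    | some b =>
      if b then some ("(" ++ field ++ "[index_xpp] - 2 * " ++ field ++ "[index_xp] + " ++ field ++ "[index]) / (dx * dx)")
      else match PySem.List.pyGet? flags 1 with
        | none => none
        | some b2 =>
          if b2 then some ("(" ++ field ++ "[index] - 2 * " ++ field ++ "[index_xm] + " ++ field ++ "[index_xmm]) / (dx * dx)")
          else some ("(" ++ field ++ "[index_xp] - 2 * " ++ field ++ "[index] + " ++ field ++ "[index_xm]) / (dx * dx)")
  else if deriv = "4" then
    match PySem.List.pyGet? flags 2 with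
    | none => none
    | some b =>
      if b then some ("(" ++ field ++ "[index_ypp] - 2 * " ++ field ++ "[index_yp] + " ++ field ++ "[index]) / (dx * dx)")
      else match PySem.List.pyGet? flags 3 with
        | none => none
        | some b2 =>
          if b2 then some ("(" ++ field ++ "[index] - 2 * " ++ field ++ "[index_ym] + " ++ field ++ "[index_ymm]) / (dx * dx)")
          else some ("(" ++ field ++ "[index_yp] - 2 * " ++ field ++ "[index] + " ++ field ++ "[index_ym]) / (dx * dx)")
  else if deriv = "5" then
    match PySem.List.pyGet? flags 4 with
    | none => none
    | some b =>
      if b then some ("(" ++ field ++ "[index_zpp] - 2 * " ++ field ++ "[index_zp] + " ++ field ++ "[index]) / (dx * dx)")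
      else match PySem.List.pyGet? flags 5 with
        | none => none
        | some b2 =>
          if b2 then some ("(" ++ field ++ "[index] - 2 * " ++ field ++ "[index_zm] + " ++ field ++ "[index_zmm]) / (dx * dx)")
          else some ("(" ++ field ++ "[index_zp] - 2 * " ++ field ++ "[index] + " ++ field ++ "[index_zm]) / (dx * dx)")
  else none  -- Python falls off the end: None, and the later '+' raises TypeError

-- one iteration of A's loop body (none = the Python raises on this line)
def pvLineA (flags : List Bool) (line : String) : Option String :=
  if PySem.Str.isIn "INLINE_DERIV" line then
    let parts := pvSplit line "INLINE_DERIV"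
    let lineBefore := parts.getD 0 ""
    match parts[1]? with
    | none => none
    | some rest =>
      match (pvSplit rest ")")[1]? with
      | none => none
      | some lineAfter =>
        match (pvSplit rest "(")[1]? with
        | none => none
        | some inner =>
          let funcArgs := pvSplit ((pvSplit inner ")").getD 0 "") ","
          let field := PySem.Str.strip (funcArgs.getD 0 "")
          match funcArgs[1]? with
          | none => none
          | some dv =>
            match pvSingleA field (PySem.Str.strip dv) flags with
            | none => none
            | some e => some (lineBefore ++ e ++ lineAfter)
  else some line

def inlineDerivatives (kernel : String) (boundaryFlags : List Bool) : String :=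
  ((pvSplit kernel "\n").foldl
    (fun acc line =>
      match acc with
      | none => none
      | some nk =>
        match pvLineA boundaryFlags line with
        | none => none
        | some s => some (nk ++ s ++ "\n"))
    (some "")).getD ""

-- ===== PORT B =====
-- boundaryFlags[i] if i < len(boundaryFlags) else False
def pvFlag (flags : List Bool) (i : Nat) : Bool := if i < flags.length then flags.getD i false else false

-- the first-derivative piece-list for one axis (field.join pieces renders the stencil)
def pvFirst (flags : List Bool) (axis : Nat) : List String :=
  let s := String.ofList ["xyz".toList.getD axis 'x']   -- 'xyz'[axis], axis < 3 always
  if pvFlag flags (2 * axis) then ["(", "[index_" ++ s ++ "p] - ", "[index]) / dx"]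
  else if pvFlag flags (2 * axis + 1) then ["(", "[index] - ", "[index_" ++ s ++ "m]) / dx"]
  else ["(", "[index_" ++ s ++ "p] - ", "[index_" ++ s ++ "m]) / (2 * dx)"]

-- the second-derivative piece-list for one axis
def pvSecond (flags : List Bool) (axis : Nat) : List String :=
  let s := String.ofList ["xyz".toList.getD axis 'x']
  if pvFlag flags (2 * axis) then ["(", "[index_" ++ s ++ "pp] - 2 * ", "[index_" ++ s ++ "p] + ", "[index]) / (dx * dx)"]
  else if pvFlag flags (2 * axis + 1) then ["(", "[index] - 2 * ", "[index_" ++ s ++ "m] + ", "[index_" ++ s ++ "mm]) / (dx * dx)"]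
  else ["(", "[index_" ++ s ++ "p] - 2 * ", "[index] + ", "[index_" ++ s ++ "m]) / (dx * dx)"]

-- stage 1: _stencilTable — two loops over range(3) appending to table
def pvTable (flags : List Bool) : List (List String) :=
  let t1 := (List.range 3).foldl (fun t axis => t ++ [pvFirst flags axis]) []
  (List.range 3).foldl (fun t axis => t ++ [pvSecond flags axis]) t1

-- field.join(table[int(deriv)]) (none = int() or the table index raises)
def pvRenderB (field deriv : String) (table : List (List String)) : Option String :=
  match PySem.Int.ofStr? deriv with
  | none => none
  | some d =>
    match PySem.List.pyGet? table d with
    | none => none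
    | some pieces => some (PySem.Str.join field pieces)

-- stage 2, one line: _substLine(line, table)
def pvLineB (table : List (List String)) (line : String) : Option String :=
  if PySem.Str.isIn "INLINE_DERIV" line then
    let before := (pvSplit line "INLINE_DERIV").getD 0 ""
    match (pvSplit line "INLINE_DERIV")[1]? with
    | none => none
    | some rest =>
      match (pvSplit rest ")")[1]? with
      | none => none
      | some after =>
        match (pvSplit rest "(")[1]? with
        | none => none
        | some inner =>
          let args := pvSplit ((pvSplit inner ")").getD 0 "") ","
          match args[1]? with
          | none => none
          | some dv =>
            match pvRenderB (PySem.Str.strip (args.getD 0 "")) (PySem.Str.strip dv) table with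
            | none => none
            | some e => some (before ++ e ++ after)
  else some line

def inlineDerivatives_alt (kernel : String) (boundaryFlags : List Bool) : String :=
  let table := pvTable boundaryFlags
  match (pvSplit kernel "\n").mapM (pvLineB table) with
  | some out => PySem.Str.join "\n" out ++ "\n"
  | none => ""

-- ===== PRECONDITION & SPEC =====
-- the two boundary flags a derivative along one axis may read: flags[i] exists, and
-- if it is False then flags[i+1] exists too (Python's short-circuit)
def pvFlagsOK (flags : List Bool) (i : Nat) : Bool :=
  decide (i < flags.length) && (flags.getD i false || decide (i + 1 < flags.length))

def pvDerivOK (flags : List Bool) (deriv : String) : Bool :=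
  ((deriv == "0" || deriv == "3") && pvFlagsOK flags 0) ||
  ((deriv == "1" || deriv == "4") && pvFlagsOK flags 2) ||
  ((deriv == "2" || deriv == "5") && pvFlagsOK flags 4)

-- a line A's loop processes without an exception: either no INLINE_DERIV, or the macro
-- call is well-formed — ')' after the macro name, '(', a second argument, the derivative
-- code one of '0'..'5', and the boundary flags it reads present
def pvLineOK (flags : List Bool) (line : String) : Bool :=
  !(PySem.Str.isIn "INLINE_DERIV" line) ||
  (match (pvSplit line "INLINE_DERIV")[1]? with
   | none => false
   | some rest =>
     (match (pvSplit rest ")")[1]? with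
      | none => false
      | some _ =>
        match (pvSplit rest "(")[1]? with
        | none => false
        | some inner =>
          match (pvSplit ((pvSplit inner ")").getD 0 "") ",")[1]? with
          | none => false
          | some dv => pvDerivOK flags (PySem.Str.strip dv)))

-- Pre_ holds exactly when Python A returns normally: every line is processed without an
-- exception (otherwise A raises IndexError or TypeError and returns nothing).
def Pre_inlineDerivatives (kernel : String) (boundaryFlags : List Bool) : Prop :=
  ∀ line ∈ pvSplit kernel "\n", pvLineOK boundaryFlags line = true
instance (kernel : String) (boundaryFlags : List Bool) : Decidable (Pre_inlineDerivatives kernel boundaryFlags) := by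
  unfold Pre_inlineDerivatives; infer_instance

def pvWitness_inlineDerivatives : String × List Bool :=
  ("u += INLINE_DERIV(p, 0);\nv += INLINE_DERIV(q, 4);", [false, true, false, false, true, false])

def Spec_inlineDerivatives (kernel : String) (boundaryFlags : List Bool) (out : String) : Prop := out = inlineDerivatives_alt kernel boundaryFlags
instance (kernel : String) (boundaryFlags : List Bool) (out : String) : Decidable (Spec_inlineDerivatives kernel boundaryFlags out) := by unfold Spec_inlineDerivatives; infer_instance

-- ===== CLAIM (what is proved, stated in full; the proofs are below) =====
def Claim_equal_inlineDerivatives : Prop := ∀ (kernel : String) (boundaryFlags : List Bool), Dom_inlineDerivatives kernel boundaryFlags → Pre_inlineDerivatives kernel boundaryFlags → Spec_inlineDerivatives kernel boundaryFlags (inlineDerivatives kernel boundaryFlags)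

-- ===== LEMMAS AND PROOFS =====

lemma pvFlag_eq (flags : List Bool) (i : Nat) : pvFlag flags i = flags.getD i false := by
  unfold pvFlag; split
  · rfl
  · rw [List.getD_eq_getElem?_getD, List.getElem?_eq_none (by omega)]; rfl

lemma pvJoin3 (f a b c : String) : PySem.Str.join f [a, b, c] = a ++ f ++ b ++ f ++ c := by
  simp [PySem.Str.join, PySem.Chars.join, List.intercalate, List.intersperse,
        ← String.toList_append, String.append_assoc]

lemma pvJoin4 (f a b c d : String) : PySem.Str.join f [a, b, c, d] = a ++ f ++ b ++ f ++ c ++ f ++ d := by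
  simp [PySem.Str.join, PySem.Chars.join, List.intercalate, List.intersperse,
        ← String.toList_append, String.append_assoc]

lemma pvTable_eval (flags : List Bool) : pvTable flags =
    [pvFirst flags 0, pvFirst flags 1, pvFirst flags 2,
     pvSecond flags 0, pvSecond flags 1, pvSecond flags 2] := rfl

lemma pvTab0 (flags : List Bool) : PySem.List.pyGet? (pvTable flags) (0 : Int) = some (pvFirst flags 0) := by
  rw [pvTable_eval]; simp [PySem.List.pyGet?, PySem.List.pyIdx?]
lemma pvTab1 (flags : List Bool) : PySem.List.pyGet? (pvTable flags) (1 : Int) = some (pvFirst flags 1) := by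
  rw [pvTable_eval]; simp [PySem.List.pyGet?, PySem.List.pyIdx?]
lemma pvTab2 (flags : List Bool) : PySem.List.pyGet? (pvTable flags) (2 : Int) = some (pvFirst flags 2) := by
  rw [pvTable_eval]; simp [PySem.List.pyGet?, PySem.List.pyIdx?]
lemma pvTab3 (flags : List Bool) : PySem.List.pyGet? (pvTable flags) (3 : Int) = some (pvSecond flags 0) := by
  rw [pvTable_eval]; simp [PySem.List.pyGet?, PySem.List.pyIdx?]
lemma pvTab4 (flags : List Bool) : PySem.List.pyGet? (pvTable flags) (4 : Int) = some (pvSecond flags 1) := by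
  rw [pvTable_eval]; simp [PySem.List.pyGet?, PySem.List.pyIdx?]
lemma pvTab5 (flags : List Bool) : PySem.List.pyGet? (pvTable flags) (5 : Int) = some (pvSecond flags 2) := by
  rw [pvTable_eval]; simp [PySem.List.pyGet?, PySem.List.pyIdx?]

lemma pvFlags_get (flags : List Bool) (i : Nat) (h : pvFlagsOK flags i = true) :
    PySem.List.pyGet? flags (i : Int) = some (flags.getD i false) ∧
    (flags.getD i false = false → PySem.List.pyGet? flags ((i : Int) + 1) = some (flags.getD (i + 1) false)) := by
  simp only [pvFlagsOK, Bool.and_eq_true, Bool.or_eq_true, decide_eq_true_eq] at h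
  obtain ⟨h1, h2⟩ := h
  constructor
  · rw [PySem.List.pyGet?_natCast, List.getElem?_eq_getElem h1, List.getD_eq_getElem _ _ h1]
  · intro hf
    have h3 : i + 1 < flags.length := by
      rcases h2 with h2 | h2
      · rw [hf] at h2; cases h2
      · exact h2
    have : ((i : Int) + 1) = ((i + 1 : Nat) : Int) := by push_cast; ring
    rw [this, PySem.List.pyGet?_natCast, List.getElem?_eq_getElem h3, List.getD_eq_getElem _ _ h3]

lemma go_ne_nil (sep : List Char) : ∀ (fuel : Nat) (l cur : List Char) (acc : List (List Char)),
    PySem.Chars.splitOn.go sep fuel l cur acc ≠ [] := by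
  intro fuel
  induction fuel with
  | zero => intro l cur acc; rw [PySem.Chars.splitOn.go]; simp
  | succ n ih =>
    intro l cur acc
    cases l with
    | nil => rw [PySem.Chars.splitOn.go]; simp; omega
    | cons c rest =>
      rw [PySem.Chars.splitOn.go]
      by_cases hp : sep.isPrefixOf (c :: rest) = true
      · simp only [hp, if_true]; exact ih _ _ _
      · simp only [hp]; exact ih _ _ _

lemma pvSplit_nl_ne_nil (s : String) : pvSplit s "\n" ≠ [] := by
  unfold pvSplit
  rw [PySem.Str.split?]
  simp [PySem.Chars.split?, PySem.Chars.splitOn]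
  exact fun h => go_ne_nil _ _ _ _ _ h

lemma ofList_cons' (c : Char) (l : List Char) : String.ofList (c :: l) = String.ofList [c] ++ String.ofList l := by
  rw [← String.ofList_append]; rfl

lemma join_cat (xs : List String) (x : String) :
    PySem.Str.join "\n" (x :: xs) ++ "\n" = (x :: xs).foldr (fun s r => s ++ "\n" ++ r) "" := by
  induction xs generalizing x with
  | nil => simp [PySem.Str.join, PySem.Chars.join, List.intercalate, String.append_empty]
  | cons y t ih =>
    rw [List.foldr_cons, ← ih y]
    simp only [PySem.Str.join, PySem.Chars.join, List.intercalate, List.map_cons]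
    rw [List.intersperse_cons₂, List.flatten_cons]
    simp [String.ofList_append, String.append_assoc]
    rw [ofList_cons']
    simp [String.append_assoc]

lemma pvRender_eq (field deriv : String) (flags : List Bool) (h : pvDerivOK flags deriv = true) :
    pvRenderB field deriv (pvTable flags) = pvSingleA field deriv flags ∧
    (pvSingleA field deriv flags).isSome = true := by
  simp only [pvDerivOK, Bool.or_eq_true, Bool.and_eq_true, beq_iff_eq] at h
  rcases h with (⟨hd, hf⟩ | ⟨hd, hf⟩) | ⟨hd, hf⟩
  all_goals obtain ⟨hg, hg2⟩ := pvFlags_get flags _ hf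
  all_goals push_cast at hg hg2
  all_goals rcases hd with hd | hd
  all_goals subst hd
  · -- "0"
    have e : PySem.Int.ofStr? "0" = some 0 := by decide
    cases hb : flags.getD 0 false with
    | true =>
      rw [hb] at hg
      refine ⟨?_, by simp [pvSingleA, hg]⟩
      simp only [List.getD_eq_getElem?_getD] at hb
      simp [pvRenderB, pvSingleA, e, hg, pvTab0, pvFirst, pvFlag_eq, List.getD_eq_getElem?_getD, hb,
            pvJoin3, String.append_assoc]
    | false =>
      rw [hb] at hg; specialize hg2 hb
      cases hb2 : flags.getD 1 false with
      | true =>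
        rw [hb2] at hg2
        refine ⟨?_, by simp [pvSingleA, hg, hg2]⟩
        simp only [List.getD_eq_getElem?_getD] at hb hb2
        simp [pvRenderB, pvSingleA, e, hg, hg2, pvTab0, pvFirst, pvFlag_eq, List.getD_eq_getElem?_getD,
              hb, hb2, pvJoin3, String.append_assoc]
      | false =>
        rw [hb2] at hg2
        refine ⟨?_, by simp [pvSingleA, hg, hg2]⟩
        simp only [List.getD_eq_getElem?_getD] at hb hb2
        simp [pvRenderB, pvSingleA, e, hg, hg2, pvTab0, pvFirst, pvFlag_eq, List.getD_eq_getElem?_getD,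
              hb, hb2, pvJoin3, String.append_assoc]
  · -- "3"
    have e : PySem.Int.ofStr? "3" = some 3 := by decide
    cases hb : flags.getD 0 false with
    | true =>
      rw [hb] at hg
      refine ⟨?_, by simp [pvSingleA, hg]⟩
      simp only [List.getD_eq_getElem?_getD] at hb
      simp [pvRenderB, pvSingleA, e, hg, pvTab3, pvSecond, pvFlag_eq, List.getD_eq_getElem?_getD, hb,
            pvJoin4, String.append_assoc]
    | false =>
      rw [hb] at hg; specialize hg2 hb
      cases hb2 : flags.getD 1 false with
      | true =>
        rw [hb2] at hg2
        refine ⟨?_, by simp [pvSingleA, hg, hg2]⟩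
        simp only [List.getD_eq_getElem?_getD] at hb hb2
        simp [pvRenderB, pvSingleA, e, hg, hg2, pvTab3, pvSecond, pvFlag_eq, List.getD_eq_getElem?_getD,
              hb, hb2, pvJoin4, String.append_assoc]
      | false =>
        rw [hb2] at hg2
        refine ⟨?_, by simp [pvSingleA, hg, hg2]⟩
        simp only [List.getD_eq_getElem?_getD] at hb hb2
        simp [pvRenderB, pvSingleA, e, hg, hg2, pvTab3, pvSecond, pvFlag_eq, List.getD_eq_getElem?_getD,
              hb, hb2, pvJoin4, String.append_assoc]
  · -- "1"
    have e : PySem.Int.ofStr? "1" = some 1 := by decide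
    cases hb : flags.getD 2 false with
    | true =>
      rw [hb] at hg
      refine ⟨?_, by simp [pvSingleA, hg]⟩
      simp only [List.getD_eq_getElem?_getD] at hb
      simp [pvRenderB, pvSingleA, e, hg, pvTab1, pvFirst, pvFlag_eq, List.getD_eq_getElem?_getD, hb,
            pvJoin3, String.append_assoc]
    | false =>
      rw [hb] at hg; specialize hg2 hb
      cases hb2 : flags.getD 3 false with
      | true =>
        rw [hb2] at hg2
        refine ⟨?_, by simp [pvSingleA, hg, hg2]⟩
        simp only [List.getD_eq_getElem?_getD] at hb hb2
        simp [pvRenderB, pvSingleA, e, hg, hg2, pvTab1, pvFirst, pvFlag_eq, List.getD_eq_getElem?_getD,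
              hb, hb2, pvJoin3, String.append_assoc]
      | false =>
        rw [hb2] at hg2
        refine ⟨?_, by simp [pvSingleA, hg, hg2]⟩
        simp only [List.getD_eq_getElem?_getD] at hb hb2
        simp [pvRenderB, pvSingleA, e, hg, hg2, pvTab1, pvFirst, pvFlag_eq, List.getD_eq_getElem?_getD,
              hb, hb2, pvJoin3, String.append_assoc]
  · -- "4"
    have e : PySem.Int.ofStr? "4" = some 4 := by decide
    cases hb : flags.getD 2 false with
    | true =>
      rw [hb] at hg
      refine ⟨?_, by simp [pvSingleA, hg]⟩
      simp only [List.getD_eq_getElem?_getD] at hb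
      simp [pvRenderB, pvSingleA, e, hg, pvTab4, pvSecond, pvFlag_eq, List.getD_eq_getElem?_getD, hb,
            pvJoin4, String.append_assoc]
    | false =>
      rw [hb] at hg; specialize hg2 hb
      cases hb2 : flags.getD 3 false with
      | true =>
        rw [hb2] at hg2
        refine ⟨?_, by simp [pvSingleA, hg, hg2]⟩
        simp only [List.getD_eq_getElem?_getD] at hb hb2
        simp [pvRenderB, pvSingleA, e, hg, hg2, pvTab4, pvSecond, pvFlag_eq, List.getD_eq_getElem?_getD,
              hb, hb2, pvJoin4, String.append_assoc]
      | false =>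
        rw [hb2] at hg2
        refine ⟨?_, by simp [pvSingleA, hg, hg2]⟩
        simp only [List.getD_eq_getElem?_getD] at hb hb2
        simp [pvRenderB, pvSingleA, e, hg, hg2, pvTab4, pvSecond, pvFlag_eq, List.getD_eq_getElem?_getD,
              hb, hb2, pvJoin4, String.append_assoc]
  · -- "2"
    have e : PySem.Int.ofStr? "2" = some 2 := by decide
    cases hb : flags.getD 4 false with
    | true =>
      rw [hb] at hg
      refine ⟨?_, by simp [pvSingleA, hg]⟩
      simp only [List.getD_eq_getElem?_getD] at hb
      simp [pvRenderB, pvSingleA, e, hg, pvTab2, pvFirst, pvFlag_eq, List.getD_eq_getElem?_getD, hb,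
            pvJoin3, String.append_assoc]
    | false =>
      rw [hb] at hg; specialize hg2 hb
      cases hb2 : flags.getD 5 false with
      | true =>
        rw [hb2] at hg2
        refine ⟨?_, by simp [pvSingleA, hg, hg2]⟩
        simp only [List.getD_eq_getElem?_getD] at hb hb2
        simp [pvRenderB, pvSingleA, e, hg, hg2, pvTab2, pvFirst, pvFlag_eq, List.getD_eq_getElem?_getD,
              hb, hb2, pvJoin3, String.append_assoc]
      | false =>
        rw [hb2] at hg2
        refine ⟨?_, by simp [pvSingleA, hg, hg2]⟩
        simp only [List.getD_eq_getElem?_getD] at hb hb2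
        simp [pvRenderB, pvSingleA, e, hg, hg2, pvTab2, pvFirst, pvFlag_eq, List.getD_eq_getElem?_getD,
              hb, hb2, pvJoin3, String.append_assoc]
  · -- "5"
    have e : PySem.Int.ofStr? "5" = some 5 := by decide
    cases hb : flags.getD 4 false with
    | true =>
      rw [hb] at hg
      refine ⟨?_, by simp [pvSingleA, hg]⟩
      simp only [List.getD_eq_getElem?_getD] at hb
      simp [pvRenderB, pvSingleA, e, hg, pvTab5, pvSecond, pvFlag_eq, List.getD_eq_getElem?_getD, hb,
            pvJoin4, String.append_assoc]
    | false =>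
      rw [hb] at hg; specialize hg2 hb
      cases hb2 : flags.getD 5 false with
      | true =>
        rw [hb2] at hg2
        refine ⟨?_, by simp [pvSingleA, hg, hg2]⟩
        simp only [List.getD_eq_getElem?_getD] at hb hb2
        simp [pvRenderB, pvSingleA, e, hg, hg2, pvTab5, pvSecond, pvFlag_eq, List.getD_eq_getElem?_getD,
              hb, hb2, pvJoin4, String.append_assoc]
      | false =>
        rw [hb2] at hg2
        refine ⟨?_, by simp [pvSingleA, hg, hg2]⟩
        simp only [List.getD_eq_getElem?_getD] at hb hb2
        simp [pvRenderB, pvSingleA, e, hg, hg2, pvTab5, pvSecond, pvFlag_eq, List.getD_eq_getElem?_getD,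
              hb, hb2, pvJoin4, String.append_assoc]


lemma pvLine_eq (flags : List Bool) (line : String) (h : pvLineOK flags line = true) :
    pvLineB (pvTable flags) line = pvLineA flags line ∧ (pvLineA flags line).isSome = true := by
  unfold pvLineOK at h
  unfold pvLineA pvLineB
  cases hin : PySem.Str.isIn "INLINE_DERIV" line
  · simp
  · rw [hin] at h
    simp only [Bool.not_true, Bool.false_or] at h
    simp only [if_true]
    rcases hp : (pvSplit line "INLINE_DERIV")[1]? with _ | rest
    · rw [hp] at h; simp at h
    · rw [hp] at h; simp only at h
      simp only
      rcases hq : (pvSplit rest ")")[1]? with _ | lineAfter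
      · rw [hq] at h; simp at h
      · rw [hq] at h; simp only at h
        simp only
        rcases hr : (pvSplit rest "(")[1]? with _ | inner
        · rw [hr] at h; simp at h
        · rw [hr] at h; simp only at h
          simp only
          rcases hv : (pvSplit ((pvSplit inner ")").getD 0 "") ",")[1]? with _ | dv
          · rw [hv] at h; simp at h
          · rw [hv] at h; simp only at h
            simp only
            obtain ⟨hBA, hS⟩ :=
              pvRender_eq (PySem.Str.strip ((pvSplit ((pvSplit inner ")").getD 0 "") ",").getD 0 ""))
                (PySem.Str.strip dv) flags h
            obtain ⟨s, hs⟩ := Option.isSome_iff_exists.mp hS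
            rw [hBA, hs]
            simp

-- B's stage 2: the mapM over lines succeeds and collects A's per-line values
lemma pvMapM_eq (flags : List Bool) (L : List String) (h : ∀ l ∈ L, pvLineOK flags l = true) :
    L.mapM (pvLineB (pvTable flags)) = some (L.map (fun l => (pvLineA flags l).getD "")) := by
  induction L with
  | nil => rfl
  | cons l t ih =>
    have hl := pvLine_eq flags l (h l (by simp))
    obtain ⟨s, hs⟩ := Option.isSome_iff_exists.mp hl.2
    have hB : pvLineB (pvTable flags) l = some s := hl.1.trans hs
    rw [List.mapM_cons, hB, ih (fun l' hl' => h l' (List.mem_cons_of_mem _ hl'))]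
    simp [hs]

-- A's fold over lines: accumulating string += line-result + '\n'
lemma pvFoldA_eq (flags : List Bool) (L : List String) (h : ∀ l ∈ L, pvLineOK flags l = true)
    (acc : String) :
    (L.foldl (fun acc line =>
        match acc with
        | none => none
        | some nk =>
          match pvLineA flags line with
          | none => none
          | some s => some (nk ++ s ++ "\n")) (some acc))
      = some (acc ++ (L.map (fun l => (pvLineA flags l).getD "")).foldr (fun s r => s ++ "\n" ++ r) "") := by
  induction L generalizing acc with
  | nil => simp [String.append_empty]
  | cons l t ih =>
    have hl := pvLine_eq flags l (h l (by simp))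
    obtain ⟨s, hs⟩ := Option.isSome_iff_exists.mp hl.2
    have iht := ih (fun l' hl' => h l' (List.mem_cons_of_mem _ hl')) (acc ++ s ++ "\n")
    simp only [List.foldl_cons, hs, List.map_cons, List.foldr_cons]
    rw [iht]
    simp [String.append_assoc]

-- ===== VERDICT (by name: the statement is the Claim_ definition above) =====
theorem inlineDerivatives_spec : Claim_equal_inlineDerivatives := by
  intro kernel flags _ hpre
  unfold Spec_inlineDerivatives inlineDerivatives inlineDerivatives_alt
  unfold Pre_inlineDerivatives at hpre
  rcases hL : pvSplit kernel "\n" with _ | ⟨l0, ls⟩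
  · exact absurd hL (pvSplit_nl_ne_nil kernel)
  · rw [hL] at hpre
    simp only [pvFoldA_eq flags (l0 :: ls) hpre "", pvMapM_eq flags (l0 :: ls) hpre,
               List.map_cons, Option.getD_some]
    rw [join_cat]
    simp [String.empty_append]
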